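-- pv_equiv track=rewrite | github.com/gmaxzhang/mahjong25 | algorithm/custom_mahjong_rules.py | all_apart
-- ===== SOURCE A (Python) =====
-- from typing import List, Tuple, Optional, Dict, Iterable, Sequence, Literal
--
-- def is_flower(x: str) -> bool:
--     # Flowers are strictly F1..F8
--     return len(x) >= 2 and x[0] == "F" and x[1:].isdigit()
--
-- def is_suited(x: str) -> bool:
--     return len(x) == 2 and x[0].isdigit() and x[1] in "bwt"
--
-- def suit_of(x: str) -> Optional[str]:
--     return x[1] if is_suited(x) else None
--
-- def rank_of(x: str) -> Optional[int]:
--     return int(x[0]) if is_suited(x) else None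
--
-- def all_apart(tiles14_with_flowers: List[str]) -> bool:
--     """
--     All Apart / 13 non-neighbors:
--       - Exactly one of {1,4,7} or {2,5,8} or {3,6,9} in each suit (so 9 suited tiles total).
--       - Remaining 5 are honors/flowers, all distinct, with at most 1 flower among the 14.
--       - Only sensible on a pure 14-tile hand (i.e., no declared melds).
--     """
--     tiles = tiles14_with_flowers[:]
--     if len(tiles) != 14:
--         return False
--     flowers = [x for x in tiles if is_flower(x)]
--     if len(flowers) > 1:
--         return False
--
--     suited = [x for x in tiles if is_suited(x)]
--     others = [x for x in tiles if not is_suited(x)]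
--     if len(suited) != 9 or len(others) != 5:
--         return False
--
--     groups = [{1,4,7},{2,5,8},{3,6,9}]
--     def suit_ok(s: str) -> bool:
--         ranks = sorted(rank_of(x) for x in suited if suit_of(x)==s)
--         return any(sorted(g) == ranks for g in groups)
--
--     if not (suit_ok('b') and suit_ok('w') and suit_ok('t')):
--         return False
--
--     non_suited = [x for x in tiles if not is_suited(x)]
--     # all distinct among honors/flowers
--     if len(set(non_suited)) != len(non_suited):
--         return False
--     return True
-- ===== SOURCE B (Python) =====
-- # B: enumerate the 27 valid suited skeletons once and test membership of the
-- # sorted suited multiset, instead of per-suit filter/sort/group comparisons.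
-- _GROUPS = ({1, 4, 7}, {2, 5, 8}, {3, 6, 9})
-- _SKELETONS = [
--     sorted(["%db" % r for r in gb] + ["%dw" % r for r in gw] + ["%dt" % r for r in gt])
--     for gb in _GROUPS for gw in _GROUPS for gt in _GROUPS
-- ]
--
--
-- def _is_flower(x: str) -> bool:
--     return len(x) >= 2 and x[0] == "F" and x[1:].isdigit()
--
--
-- def _is_suited(x: str) -> bool:
--     return len(x) == 2 and x[0].isdigit() and x[1] in "bwt"
--
--
-- def all_apart(tiles14_with_flowers):
--     if len(tiles14_with_flowers) != 14:
--         return False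
--     suited, others, nflower = [], [], 0
--     for x in tiles14_with_flowers:
--         if _is_suited(x):
--             suited.append(x)
--         else:
--             others.append(x)
--         if _is_flower(x):
--             nflower += 1
--     if nflower > 1:
--         return False
--     return sorted(suited) in _SKELETONS and len(set(others)) == len(others)
-- ===== Notes on version B (the rewrite author's own statement) =====
-- stated objective: alternative
-- what changed: Instead of A's per-suit filtered comprehensions each sorted and compared against the rank groups, B precomputes the 27 valid 9-tile suited skeletons (one group per suit) as sorted string lists and decides the hand by a single partition pass plus one membership test of sorted(suited) in that table; suited/others counts are implied by the table so the 9/5 length guards disappear.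
import Mathlib
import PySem

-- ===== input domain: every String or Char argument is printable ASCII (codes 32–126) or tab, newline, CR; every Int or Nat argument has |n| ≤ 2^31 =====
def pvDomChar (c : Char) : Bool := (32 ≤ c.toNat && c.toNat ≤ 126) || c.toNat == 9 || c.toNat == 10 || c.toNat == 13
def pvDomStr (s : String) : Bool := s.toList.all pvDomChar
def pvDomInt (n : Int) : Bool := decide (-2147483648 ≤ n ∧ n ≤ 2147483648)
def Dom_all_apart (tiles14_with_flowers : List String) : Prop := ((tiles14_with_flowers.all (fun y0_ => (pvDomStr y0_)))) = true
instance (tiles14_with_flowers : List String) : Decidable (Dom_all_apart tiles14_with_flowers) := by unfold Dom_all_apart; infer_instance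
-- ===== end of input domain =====

-- B replaces A's per-suit filter/sort/compare-against-rank-groups by a precomputed table of the
-- 27 valid sorted suited skeletons, one partition pass and a single membership test: 'alternative'.

-- ===== PORT A =====
-- is_flower: len(x) >= 2 and x[0] == "F" and x[1:].isdigit()
def isFlowerA (x : String) : Bool :=
  decide (2 ≤ PySem.Chars.len x.toList) && (x.toList[0]? == some 'F')
    && PySem.Chars.strIsdigit (PySem.List.slice x.toList (some 1) none)

-- is_suited: len(x) == 2 and x[0].isdigit() and x[1] in "bwt"
-- (the length-2 match is the len(x)==2 test; membership of the single char in "bwt" is the three equalities)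
def isSuitedA (x : String) : Bool :=
  match x.toList with
  | [c0, c1] => PySem.Chars.isdigit c0 && (c1 == 'b' || c1 == 'w' || c1 == 't')
  | _ => false

-- suit_of: x[1] if is_suited(x) else None
def suitOfA (x : String) : Option Char :=
  if isSuitedA x then x.toList[1]? else none

-- rank_of: int(x[0]) if is_suited(x) else None  (int of a single digit char is its code - 48;
-- headD's default is never read: is_suited guarantees a first character)
def rankOfA (x : String) : Option Int :=
  if isSuitedA x then some (((x.toList.headD ' ').toNat : Int) - 48) else none

def all_apart (tiles14_with_flowers : List String) : Bool :=
  let tiles := tiles14_with_flowers   -- tiles14_with_flowers[:] (copy; return-value irrelevant)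
  if tiles.length ≠ 14 then false
  else
    let flowers := tiles.filter isFlowerA
    if flowers.length > 1 then false
    else
      let suited := tiles.filter isSuitedA
      let others := tiles.filter (fun x => !isSuitedA x)
      if suited.length ≠ 9 ∨ others.length ≠ 5 then false
      else
        -- suit_ok(s): ranks = sorted(rank_of(x) for x in suited if suit_of(x)==s);
        -- rank_of is always an int there (suit_of(x)==s entails is_suited), so getD 0 is never the default
        let suit_ok : Char → Bool := fun s =>
          let ranks := PySem.List.sorted
            ((suited.filter (fun x => suitOfA x == some s)).map (fun x => (rankOfA x).getD 0))
            (fun r => r) false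
          ([PySem.Set.ofList [1,4,7], PySem.Set.ofList [2,5,8], PySem.Set.ofList [3,6,9]] : List (List Int)).any
            (fun g => PySem.List.sorted g (fun r => r) false == ranks)
        if !(suit_ok 'b' && suit_ok 'w' && suit_ok 't') then false
        else
          let non_suited := tiles.filter (fun x => !isSuitedA x)
          if (PySem.Set.ofList non_suited).length ≠ non_suited.length then false
          else true

-- ===== PORT B =====
-- _is_flower (same source text as A's helper)
def isFlowerB (x : String) : Bool :=
  decide (2 ≤ PySem.Chars.len x.toList) && (x.toList[0]? == some 'F')
    && PySem.Chars.strIsdigit (PySem.List.slice x.toList (some 1) none)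

-- _is_suited (same source text as A's helper)
def isSuitedB (x : String) : Bool :=
  match x.toList with
  | [c0, c1] => PySem.Chars.isdigit c0 && (c1 == 'b' || c1 == 'w' || c1 == 't')
  | _ => false

-- "%d<s>" % r  =  str(r) + the suit letter
def strOfB (r : Int) (s : Char) : String := String.ofList (PySem.Int.toChars r ++ [s])

-- _GROUPS = ({1,4,7},{2,5,8},{3,6,9})
def groupsB : List (List Int) :=
  [PySem.Set.ofList [1,4,7], PySem.Set.ofList [2,5,8], PySem.Set.ofList [3,6,9]]

-- the unsorted concatenation ["%db"%r for r in gb] + ["%dw"%r for r in gw] + ["%dt"%r for r in gt]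
def rawSk (gb gw gt : List Int) : List String :=
  gb.map (fun r => strOfB r 'b') ++ gw.map (fun r => strOfB r 'w') ++ gt.map (fun r => strOfB r 't')

-- _SKELETONS: the 27 sorted skeletons, one group choice per suit
def skeletonsB : List (List String) :=
  groupsB.flatMap (fun gb => groupsB.flatMap (fun gw => groupsB.map (fun gt =>
    PySem.List.sorted (rawSk gb gw gt) (fun x => x) false)))

-- loop body: route x to suited/others, then nflower += _is_flower(x)
def altStep (acc : List String × List String × Int) (x : String) :
    List String × List String × Int :=
  if isSuitedB x then (acc.1 ++ [x], acc.2.1, acc.2.2 + (if isFlowerB x then 1 else 0))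
  else (acc.1, acc.2.1 ++ [x], acc.2.2 + (if isFlowerB x then 1 else 0))

def all_apart_alt (tiles14_with_flowers : List String) : Bool :=
  if tiles14_with_flowers.length ≠ 14 then false
  else
    let st := tiles14_with_flowers.foldl altStep ([], [], 0)
    if st.2.2 > 1 then false
    else
      skeletonsB.contains (PySem.List.sorted st.1 (fun x => x) false)
        && ((PySem.Set.ofList st.2.1).length == st.2.1.length)

-- ===== PRECONDITION & SPEC =====
def Spec_all_apart (tiles14_with_flowers : List String) (out : Bool) : Prop := out = all_apart_alt tiles14_with_flowers
instance (tiles14_with_flowers : List String) (out : Bool) : Decidable (Spec_all_apart tiles14_with_flowers out) := by unfold Spec_all_apart; infer_instance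

-- ===== CLAIM (what is proved, stated in full; the proofs are below) =====
def Claim_equal_all_apart : Prop := ∀ (tiles14_with_flowers : List String), Dom_all_apart tiles14_with_flowers → Spec_all_apart tiles14_with_flowers (all_apart tiles14_with_flowers)

-- ===== LEMMAS AND PROOFS =====

-- proof-side abbreviations
def pSuit (s : Char) (x : String) : Bool := x.toList[1]? == some s
def rankB (x : String) : Int := ((x.toList.headD ' ').toNat : Int) - 48
def lits : List (List Int) := [[1,4,7],[2,5,8],[3,6,9]]

theorem isFlowerBA : isFlowerB = isFlowerA := rfl
theorem isSuitedBA : isSuitedB = isSuitedA := rfl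

theorem hgroups : groupsB = lits := by decide

theorem fold_spec (l : List String) (s o : List String) (n : Int) :
    l.foldl altStep (s, o, n) =
      (s ++ l.filter isSuitedB, o ++ l.filter (fun x => !isSuitedB x),
       n + (l.countP isFlowerB : Int)) := by
  induction l generalizing s o n with
  | nil => simp
  | cons x xs ih =>
    simp only [List.foldl_cons, List.filter_cons, List.countP_cons]
    by_cases hs : isSuitedB x = true <;> by_cases hf : isFlowerB x = true <;>
      simp [altStep, hs, hf, ih] <;> omega

theorem toChars_digit (k : Nat) (hk : k ≤ 9) :
    PySem.Int.toChars (k : Int) = [Char.ofNat (48 + k)] := by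
  interval_cases k <;> decide

theorem toNat_ofNat_digit (k : Nat) (hk : k ≤ 9) : (Char.ofNat (48 + k)).toNat = 48 + k := by
  rw [Char.toNat_ofNat, if_pos (Or.inl (by omega))]

theorem digit_bounds (c : Char) (h : PySem.Chars.isdigit c = true) :
    48 ≤ c.toNat ∧ c.toNat ≤ 57 := by
  simp [PySem.Chars.isdigit, Char.le_def] at h
  exact ⟨h.1, h.2⟩

-- the digit string of a rank in 1..9 plus the suit letter, as a char list
theorem strOf_toList (r : Int) (hr1 : 1 ≤ r) (hr9 : r ≤ 9) (s : Char) :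
    (strOfB r s).toList = [Char.ofNat (48 + r.toNat), s] := by
  obtain ⟨k, rfl⟩ : ∃ k : Nat, r = (k : Int) := ⟨r.toNat, by omega⟩
  rw [strOfB, toChars_digit k (by omega)]
  simp

theorem rank_strOf (r : Int) (hr1 : 1 ≤ r) (hr9 : r ≤ 9) (s : Char) :
    rankB (strOfB r s) = r := by
  rw [rankB, strOf_toList r hr1 hr9 s]
  show ((Char.ofNat (48 + r.toNat)).toNat : Int) - 48 = r
  rw [toNat_ofNat_digit r.toNat (by omega)]
  omega

theorem pSuit_strOf (r : Int) (hr1 : 1 ≤ r) (hr9 : r ≤ 9) (s s' : Char) :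
    pSuit s (strOfB r s') = (s' == s) := by
  rw [pSuit, strOf_toList r hr1 hr9 s']
  simp

-- a suited tile rebuilt from its rank and suit letter is itself
theorem reconstruct (x : String) (c0 c1 : Char) (hx : x.toList = [c0, c1])
    (hd : PySem.Chars.isdigit c0 = true) : strOfB (rankB x) c1 = x := by
  obtain ⟨h48, h57⟩ := digit_bounds c0 hd
  have h1 : rankB x = ((c0.toNat - 48 : Nat) : Int) := by simp [rankB, hx]; omega
  have h2 : Char.ofNat (48 + (c0.toNat - 48)) = c0 := by
    have h3 : 48 + (c0.toNat - 48) = c0.toNat := by omega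
    rw [h3, Char.ofNat_toNat]
  rw [h1, strOfB, toChars_digit _ (by omega), h2]
  rw [show ([c0] ++ [c1] : List Char) = [c0, c1] from rfl, ← hx, String.ofList_toList]

theorem shape_of_suited (x : String) (h : isSuitedA x = true) :
    ∃ c0 c1, x.toList = [c0, c1] ∧ PySem.Chars.isdigit c0 = true ∧
      (c1 = 'b' ∨ c1 = 'w' ∨ c1 = 't') := by
  rcases hx : x.toList with _ | ⟨c0, _ | ⟨c1, _ | ⟨c2, r⟩⟩⟩ <;> rw [isSuitedA, hx] at h
  · simp at h
  · simp at h
  · simp at h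
    exact ⟨c0, c1, rfl, h.1, by tauto⟩
  · simp at h

-- a list each of whose elements satisfies exactly one of p,q,r is a permutation of its three filters
theorem perm_filter3 {α : Type} (p q r : α → Bool) (l : List α)
    (h : ∀ x ∈ l, (p x = true ∧ q x = false ∧ r x = false) ∨
      (p x = false ∧ q x = true ∧ r x = false) ∨
      (p x = false ∧ q x = false ∧ r x = true)) :
    l.Perm (l.filter p ++ l.filter q ++ l.filter r) := by
  induction l with
  | nil => simp
  | cons x xs ih =>
    have ihx := ih (fun y hy => h y (List.mem_cons_of_mem x hy))
    rcases h x List.mem_cons_self with ⟨h1, h2, h3⟩ | ⟨h1, h2, h3⟩ | ⟨h1, h2, h3⟩ <;>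
      simp only [List.filter_cons, h1, h2, h3, if_true, Bool.false_eq_true, if_false]
    · exact (ihx.cons x)
    · exact (ihx.cons x).trans (by
        simpa using (List.perm_middle (a := x) (l₁ := List.filter p xs)
          (l₂ := List.filter q xs ++ List.filter r xs)).symm)
    · exact (ihx.cons x).trans (by
        simpa using (List.perm_middle (a := x) (l₁ := List.filter p xs ++ List.filter q xs)
          (l₂ := List.filter r xs)).symm)

theorem trichotomy_suited (x : String) (h : isSuitedA x = true) :
    (pSuit 'b' x = true ∧ pSuit 'w' x = false ∧ pSuit 't' x = false) ∨
    (pSuit 'b' x = false ∧ pSuit 'w' x = true ∧ pSuit 't' x = false) ∨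
    (pSuit 'b' x = false ∧ pSuit 'w' x = false ∧ pSuit 't' x = true) := by
  obtain ⟨c0, c1, hx, _, hc1⟩ := shape_of_suited x h
  rcases hc1 with h1|h1|h1 <;> subst h1 <;> simp [pSuit, hx]

theorem ranks_eq (tiles : List String) (s : Char) :
    ((tiles.filter isSuitedA).filter (fun x => suitOfA x == some s)).map
        (fun x => (rankOfA x).getD 0)
      = ((tiles.filter isSuitedA).filter (pSuit s)).map rankB := by
  rw [List.filter_congr (fun x hx => ?_)]
  · exact List.map_congr_left (fun x hx => by
      have hsu : isSuitedA x = true := (List.mem_filter.1 (List.mem_filter.1 hx).1).2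
      simp [rankOfA, rankB, hsu])
  · have hsu : isSuitedA x = true := (List.mem_filter.1 hx).2
    simp [suitOfA, pSuit, hsu]

theorem hg_lits (g : List Int) (hg : g ∈ lits) : ∀ r ∈ g, 1 ≤ r ∧ r ≤ 9 := by
  simp only [lits, List.mem_cons, List.not_mem_nil, or_false] at hg
  rcases hg with rfl | rfl | rfl <;> decide

theorem len3_lits (g : List Int) (hg : g ∈ lits) : g.length = 3 := by
  simp only [lits, List.mem_cons, List.not_mem_nil, or_false] at hg
  rcases hg with rfl | rfl | rfl <;> rfl

-- per-suit: sorted rank comparison against a group g ⟺ the suit's tiles are a permutation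
-- of g's tile strings
theorem suit_perm_iff (S : List String) (hS : ∀ x ∈ S, isSuitedA x = true) (s : Char)
    (g : List Int) (hg : ∀ r ∈ g, 1 ≤ r ∧ r ≤ 9) :
    (PySem.List.sorted ((S.filter (pSuit s)).map rankB) (fun r => r) false
      = PySem.List.sorted g (fun r => r) false)
      ↔ (S.filter (pSuit s)).Perm (g.map (fun r => strOfB r s)) := by
  rw [PySem.List.sorted_id_eq_sorted_id_iff_perm]
  constructor
  · intro h
    have hfs : S.filter (pSuit s) = ((S.filter (pSuit s)).map rankB).map (fun r => strOfB r s) := by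
      rw [List.map_map]
      symm
      calc (S.filter (pSuit s)).map ((fun r => strOfB r s) ∘ rankB)
          = (S.filter (pSuit s)).map id := List.map_congr_left (fun x hx => by
            have hmem := List.mem_filter.1 hx
            obtain ⟨c0, c1, hxl, hd, _⟩ := shape_of_suited x (hS x hmem.1)
            have hc1 : c1 = s := by
              have := hmem.2
              rw [pSuit, hxl] at this
              simpa using this
            subst hc1
            exact reconstruct x c0 c1 hxl hd)
        _ = S.filter (pSuit s) := List.map_id _
    rw [hfs]
    exact h.map (fun r => strOfB r s)
  · intro h
    have h2 := h.map rankB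
    rw [List.map_map] at h2
    refine h2.trans (List.Perm.of_eq ?_)
    calc g.map (rankB ∘ fun r => strOfB r s)
        = g.map id := List.map_congr_left (fun r hr =>
          rank_strOf r (hg r hr).1 (hg r hr).2 s)
      _ = g := List.map_id _

theorem filter_raw (gb gw gt : List Int)
    (hb : ∀ r ∈ gb, 1 ≤ r ∧ r ≤ 9) (hw : ∀ r ∈ gw, 1 ≤ r ∧ r ≤ 9)
    (ht : ∀ r ∈ gt, 1 ≤ r ∧ r ≤ 9) :
    (rawSk gb gw gt).filter (pSuit 'b') = gb.map (fun r => strOfB r 'b') ∧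
    (rawSk gb gw gt).filter (pSuit 'w') = gw.map (fun r => strOfB r 'w') ∧
    (rawSk gb gw gt).filter (pSuit 't') = gt.map (fun r => strOfB r 't') := by
  have key : ∀ (g : List Int), (∀ r ∈ g, 1 ≤ r ∧ r ≤ 9) → ∀ (s s' : Char),
      (g.map (fun r => strOfB r s')).filter (pSuit s)
        = if s' = s then g.map (fun r => strOfB r s') else [] := by
    intro g hg s s'
    by_cases h : s' = s
    · subst h
      rw [if_pos rfl, List.filter_eq_self.2]
      intro x hx
      obtain ⟨r, hr, rfl⟩ := List.mem_map.1 hx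
      rw [pSuit_strOf r (hg r hr).1 (hg r hr).2]
      simp
    · rw [if_neg h, List.filter_eq_nil_iff.2]
      intro x hx
      obtain ⟨r, hr, rfl⟩ := List.mem_map.1 hx
      rw [pSuit_strOf r (hg r hr).1 (hg r hr).2]
      simp [h]
  refine ⟨?_, ?_, ?_⟩
  · rw [rawSk, List.filter_append, List.filter_append,
      key gb hb 'b' 'b', key gw hw 'b' 'w', key gt ht 'b' 't']
    simp
  · rw [rawSk, List.filter_append, List.filter_append,
      key gb hb 'w' 'b', key gw hw 'w' 'w', key gt ht 'w' 't']
    simp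
  · rw [rawSk, List.filter_append, List.filter_append,
      key gb hb 't' 'b', key gw hw 't' 'w', key gt ht 't' 't']
    simp

-- per-triple: the three sorted-rank equalities ⟺ suited is a permutation of the raw skeleton
theorem triple_iff (S : List String) (hS : ∀ x ∈ S, isSuitedA x = true)
    (gb gw gt : List Int) (hgb : gb ∈ lits) (hgw : gw ∈ lits) (hgt : gt ∈ lits) :
    (PySem.List.sorted ((S.filter (pSuit 'b')).map rankB) (fun r => r) false
        = PySem.List.sorted gb (fun r => r) false ∧
     PySem.List.sorted ((S.filter (pSuit 'w')).map rankB) (fun r => r) false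
        = PySem.List.sorted gw (fun r => r) false ∧
     PySem.List.sorted ((S.filter (pSuit 't')).map rankB) (fun r => r) false
        = PySem.List.sorted gt (fun r => r) false)
      ↔ S.Perm (rawSk gb gw gt) := by
  have hb := hg_lits gb hgb
  have hw := hg_lits gw hgw
  have ht := hg_lits gt hgt
  rw [suit_perm_iff S hS 'b' gb hb, suit_perm_iff S hS 'w' gw hw, suit_perm_iff S hS 't' gt ht]
  constructor
  · rintro ⟨h1, h2, h3⟩
    exact (perm_filter3 _ _ _ S (fun x hx => trichotomy_suited x (hS x hx))).trans
      ((h1.append h2).append h3)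
  · intro h
    obtain ⟨e1, e2, e3⟩ := filter_raw gb gw gt hb hw ht
    exact ⟨(h.filter (pSuit 'b')).trans (List.Perm.of_eq e1),
           (h.filter (pSuit 'w')).trans (List.Perm.of_eq e2),
           (h.filter (pSuit 't')).trans (List.Perm.of_eq e3)⟩

theorem len_rawSk (gb gw gt : List Int) (hgb : gb ∈ lits) (hgw : gw ∈ lits) (hgt : gt ∈ lits) :
    (rawSk gb gw gt).length = 9 := by
  simp [rawSk, len3_lits gb hgb, len3_lits gw hgw, len3_lits gt hgt]

-- membership of sorted(suited) in the skeleton table, unfolded to the permutation form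
theorem contains_iff (S : List String) :
    skeletonsB.contains (PySem.List.sorted S (fun x => x) false) = true ↔
      ∃ gb ∈ lits, ∃ gw ∈ lits, ∃ gt ∈ lits, S.Perm (rawSk gb gw gt) := by
  rw [List.contains_iff_mem]
  unfold skeletonsB
  rw [hgroups]
  simp only [List.mem_flatMap, List.mem_map]
  constructor
  · rintro ⟨gb, hgb, gw, hgw, gt, hgt, hsk⟩
    exact ⟨gb, hgb, gw, hgw, gt, hgt,
      (PySem.List.sorted_id_eq_sorted_id_iff_perm S (rawSk gb gw gt)).1 hsk.symm⟩
  · rintro ⟨gb, hgb, gw, hgw, gt, hgt, hperm⟩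
    exact ⟨gb, hgb, gw, hgw, gt, hgt,
      ((PySem.List.sorted_id_eq_sorted_id_iff_perm S (rawSk gb gw gt)).2 hperm).symm⟩

theorem hsetlits : ([PySem.Set.ofList [1,4,7], PySem.Set.ofList [2,5,8],
    PySem.Set.ofList [3,6,9]] : List (List Int)) = lits := by decide

-- A's three suit_ok conditions ⟺ the skeleton-table membership
theorem center (tiles : List String) :
    ((∃ gb ∈ lits, PySem.List.sorted gb (fun r => r) false
        = PySem.List.sorted (((tiles.filter isSuitedA).filter (pSuit 'b')).map rankB)
            (fun r => r) false) ∧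
     (∃ gw ∈ lits, PySem.List.sorted gw (fun r => r) false
        = PySem.List.sorted (((tiles.filter isSuitedA).filter (pSuit 'w')).map rankB)
            (fun r => r) false) ∧
     (∃ gt ∈ lits, PySem.List.sorted gt (fun r => r) false
        = PySem.List.sorted (((tiles.filter isSuitedA).filter (pSuit 't')).map rankB)
            (fun r => r) false)) ↔
    skeletonsB.contains (PySem.List.sorted (tiles.filter isSuitedA) (fun x => x) false) = true := by
  rw [contains_iff]
  have hS : ∀ x ∈ tiles.filter isSuitedA, isSuitedA x = true :=
    fun x hx => (List.mem_filter.1 hx).2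
  constructor
  · rintro ⟨⟨gb, hgb, h1⟩, ⟨gw, hgw, h2⟩, ⟨gt, hgt, h3⟩⟩
    exact ⟨gb, hgb, gw, hgw, gt, hgt,
      (triple_iff _ hS gb gw gt hgb hgw hgt).1 ⟨h1.symm, h2.symm, h3.symm⟩⟩
  · rintro ⟨gb, hgb, gw, hgw, gt, hgt, hperm⟩
    obtain ⟨h1, h2, h3⟩ := (triple_iff _ hS gb gw gt hgb hgw hgt).2 hperm
    exact ⟨⟨gb, hgb, h1.symm⟩, ⟨gw, hgw, h2.symm⟩, ⟨gt, hgt, h3.symm⟩⟩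

theorem all_apart_eq (tiles : List String) : all_apart tiles = all_apart_alt tiles := by
  unfold all_apart all_apart_alt
  by_cases h14 : tiles.length = 14
  · rw [if_neg (not_not_intro h14), if_neg (not_not_intro h14), fold_spec]
    simp only [List.nil_append, Int.zero_add]
    rw [isFlowerBA, isSuitedBA]
    by_cases hf : (tiles.filter isFlowerA).length > 1
    · rw [if_pos hf,
        if_pos (show ((tiles.countP isFlowerA : Int) > 1) by
          rw [List.countP_eq_length_filter]; exact_mod_cast hf)]
    · rw [if_neg hf,
        if_neg (show ¬((tiles.countP isFlowerA : Int) > 1) by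
          rw [List.countP_eq_length_filter]; exact_mod_cast hf)]
      -- A's suit_ok booleans rewritten to the ∃-form of `center`
      have hok : ∀ s : Char,
          (([PySem.Set.ofList [1,4,7], PySem.Set.ofList [2,5,8],
              PySem.Set.ofList [3,6,9]] : List (List Int)).any
            (fun g => PySem.List.sorted g (fun r => r) false ==
              PySem.List.sorted
                (((tiles.filter isSuitedA).filter (fun x => suitOfA x == some s)).map
                  (fun x => (rankOfA x).getD 0)) (fun r => r) false) = true)
          ↔ (∃ g ∈ lits, PySem.List.sorted g (fun r => r) false
              = PySem.List.sorted (((tiles.filter isSuitedA).filter (pSuit s)).map rankB)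
                  (fun r => r) false) := by
        intro s
        rw [hsetlits, List.any_eq_true, ranks_eq]
        simp only [beq_iff_eq]
      have hOlen : (tiles.filter (fun x => !isSuitedA x)).length
          = tiles.length - (tiles.filter isSuitedA).length := by
        have h := List.length_eq_countP_add_countP isSuitedA (l := tiles)
        rw [List.countP_eq_length_filter, List.countP_eq_length_filter] at h
        have he : tiles.filter (fun a => decide ¬isSuitedA a = true)
            = tiles.filter (fun x => !isSuitedA x) := by
          apply List.filter_congr
          intro x _
          by_cases hx : isSuitedA x = true <;> simp [hx]
        rw [he] at h
        omega
      by_cases hc : skeletonsB.contains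
          (PySem.List.sorted (tiles.filter isSuitedA) (fun x => x) false) = true
      · obtain ⟨⟨gb, hgb, hokb⟩, ⟨gw, hgw, hokw⟩, ⟨gt, hgt, hokt⟩⟩ := (center tiles).2 hc
        have hperm : (tiles.filter isSuitedA).Perm (rawSk gb gw gt) :=
          (triple_iff _ (fun x hx => (List.mem_filter.1 hx).2) gb gw gt hgb hgw hgt).1
            ⟨hokb.symm, hokw.symm, hokt.symm⟩
        have hlen9 : (tiles.filter isSuitedA).length = 9 := by
          rw [hperm.length_eq, len_rawSk gb gw gt hgb hgw hgt]
        have hlen5 : (tiles.filter (fun x => !isSuitedA x)).length = 5 := by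
          rw [hOlen]; omega
        rw [if_neg (show ¬((tiles.filter isSuitedA).length ≠ 9 ∨
              (tiles.filter (fun x => !isSuitedA x)).length ≠ 5) by omega)]
        rw [if_neg (show ¬((!(_ && _ && _ : Bool)) = true) from ?hoks)]
        case hoks =>
          simp only [Bool.not_eq_true', Bool.not_eq_false, Bool.and_eq_true]
          exact ⟨⟨(hok 'b').2 ⟨gb, hgb, hokb⟩, (hok 'w').2 ⟨gw, hgw, hokw⟩⟩,
            (hok 't').2 ⟨gt, hgt, hokt⟩⟩
        rw [hc, Bool.true_and]
        by_cases hd : (PySem.Set.ofList (tiles.filter (fun x => !isSuitedA x))).length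
            = (tiles.filter (fun x => !isSuitedA x)).length
        · rw [if_neg (not_not_intro hd)]
          symm
          rw [beq_iff_eq]
          exact hd
        · rw [if_pos hd]
          symm
          rw [beq_eq_false_iff_ne]
          exact hd
      · have hcf : skeletonsB.contains
            (PySem.List.sorted (tiles.filter isSuitedA) (fun x => x) false) = false := by
          revert hc
          cases skeletonsB.contains
              (PySem.List.sorted (tiles.filter isSuitedA) (fun x => x) false) <;> simp
        rw [hcf, Bool.false_and]
        by_cases hlen : ((tiles.filter isSuitedA).length ≠ 9 ∨
            (tiles.filter (fun x => !isSuitedA x)).length ≠ 5)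
        · rw [if_pos hlen]
        · rw [if_neg hlen, if_pos (show (!(_ && _ && _ : Bool)) = true from ?hnoks)]
          case hnoks =>
            rw [Bool.not_eq_true']
            rw [show ∀ b : Bool, (b = false) = (¬ b = true) from fun b => by simp]
            intro hall
            rw [Bool.and_eq_true, Bool.and_eq_true] at hall
            exact hc ((center tiles).1 ⟨(hok 'b').1 hall.1.1, (hok 'w').1 hall.1.2,
              (hok 't').1 hall.2⟩)
  · rw [if_pos h14, if_pos h14]

-- ===== VERDICT (by name: the statement is the Claim_ definition above) =====
theorem all_apart_spec : Claim_equal_all_apart := by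
  intro tiles _
  unfold Spec_all_apart
  exact all_apart_eq tiles
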